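-- pv_equiv track=rewrite | github.com/FlyingTwigs/B10K5-D | 4.py | cetak_gambar
-- ===== SOURCE A (Python) =====
-- import math
--
-- def cetak_gambar(number_of_coloumn_and_rows):
--     result = ""
--
--     for baris in range(number_of_coloumn_and_rows):
--         for kolom in range(number_of_coloumn_and_rows):
--             if (baris == 0 or baris == number_of_coloumn_and_rows-1 or kolom == math.floor(number_of_coloumn_and_rows/2)):
--                 result += "X "
--             else:
--                 result += "= "
--         result += "\n"
--
--     return result
-- ===== SOURCE B (Python) =====
-- def cetak_gambar(number_of_coloumn_and_rows):
--     n = number_of_coloumn_and_rows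
--     mid = n // 2
--     border = "X " * n + "\n"
--     interior = "".join("X " if k == mid else "= " for k in range(n)) + "\n"
--     return "".join(border if r == 0 or r == n - 1 else interior for r in range(n))
-- ===== Notes on version B (the rewrite author's own statement) =====
-- stated objective: faster
-- what changed: Builds the border and interior row strings once as templates and joins a per-row selection, instead of deciding and appending every cell with a double condition in nested loops; per-row instead of per-cell Python string concatenations.
import Mathlib
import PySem

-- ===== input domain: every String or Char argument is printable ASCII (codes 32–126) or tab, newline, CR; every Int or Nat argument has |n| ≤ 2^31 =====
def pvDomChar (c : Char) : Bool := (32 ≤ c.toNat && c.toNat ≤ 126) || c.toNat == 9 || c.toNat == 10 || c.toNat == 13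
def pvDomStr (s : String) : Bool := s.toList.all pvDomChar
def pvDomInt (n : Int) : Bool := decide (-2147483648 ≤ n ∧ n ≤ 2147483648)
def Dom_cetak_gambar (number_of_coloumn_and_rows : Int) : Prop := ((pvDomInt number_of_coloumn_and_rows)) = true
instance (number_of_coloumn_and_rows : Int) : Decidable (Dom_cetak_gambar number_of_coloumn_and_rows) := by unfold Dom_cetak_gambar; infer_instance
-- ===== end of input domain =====

-- B builds the two row templates (border, interior) once and joins a per-row selection,
-- instead of A's nested per-cell loop; same output, objective: simpler.

-- ===== PORT A =====
-- math.floor(n/2) on an int n with |n| ≤ 2^31 is exact float arithmetic = floor division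
def cetak_gambar (number_of_coloumn_and_rows : Int) : String :=
  let n := number_of_coloumn_and_rows
  (PySem.List.pyRange 0 n 1).foldl (fun result baris =>
    ((PySem.List.pyRange 0 n 1).foldl (fun res kolom =>
        res ++ (if baris = 0 ∨ baris = n - 1 ∨ kolom = PySem.Int.floordiv n 2 then "X " else "= "))
      result) ++ "\n") ""

-- ===== PORT B =====
def cetak_gambar_alt (number_of_coloumn_and_rows : Int) : String :=
  let n := number_of_coloumn_and_rows
  let mid := PySem.Int.floordiv n 2
  let border := String.join (List.replicate n.toNat "X ") ++ "\n"          -- "X " * n + "\n"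
  let interior :=
    String.join ((PySem.List.pyRange 0 n 1).map (fun k => if k = mid then "X " else "= ")) ++ "\n"
  String.join ((PySem.List.pyRange 0 n 1).map (fun r => if r = 0 ∨ r = n - 1 then border else interior))

-- ===== PRECONDITION & SPEC =====
def Spec_cetak_gambar (number_of_coloumn_and_rows : Int) (out : String) : Prop := out = cetak_gambar_alt number_of_coloumn_and_rows
instance (number_of_coloumn_and_rows : Int) (out : String) : Decidable (Spec_cetak_gambar number_of_coloumn_and_rows out) := by unfold Spec_cetak_gambar; infer_instance

-- ===== CLAIM (what is proved, stated in full; the proofs are below) =====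
def Claim_equal_cetak_gambar : Prop := ∀ (number_of_coloumn_and_rows : Int), Dom_cetak_gambar number_of_coloumn_and_rows → Spec_cetak_gambar number_of_coloumn_and_rows (cetak_gambar number_of_coloumn_and_rows)

-- ===== LEMMAS AND PROOFS =====

-- a string-accumulating foldl is the join of the mapped list, appended to the accumulator
theorem foldl_strings (l : List String) :
    ∀ acc : String, l.foldl (· ++ ·) acc = acc ++ String.join l := by
  induction l with
  | nil => intro acc; simp [String.join]
  | cons x xs ih =>
      intro acc
      have h : String.join (x :: xs) = x ++ String.join xs := by
        show List.foldl (fun r s => r ++ s) "" (x :: xs) = _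
        rw [List.foldl_cons, show ("" : String) ++ x = x by simp, ih]
      simp only [List.foldl_cons]
      rw [ih, h, String.append_assoc]

theorem string_join_cons (s : String) (l : List String) :
    String.join (s :: l) = s ++ String.join l := by
  show List.foldl (fun r s => r ++ s) "" (s :: l) = _
  rw [List.foldl_cons, show ("" : String) ++ s = s by simp, foldl_strings]

theorem foldl_append_join (L : List Int) (f : Int → String) :
    ∀ acc : String, L.foldl (fun res k => res ++ f k) acc = acc ++ String.join (L.map f) := by
  induction L with
  | nil => intro acc; simp [String.join]
  | cons x xs ih =>
      intro acc
      simp only [List.foldl_cons, List.map_cons, string_join_cons]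
      rw [ih, String.append_assoc]

theorem cetak_gambar_eq_join (n : Int) :
    cetak_gambar n =
      String.join ((PySem.List.pyRange 0 n 1).map (fun baris =>
        String.join ((PySem.List.pyRange 0 n 1).map (fun kolom =>
          if baris = 0 ∨ baris = n - 1 ∨ kolom = PySem.Int.floordiv n 2 then "X " else "= ")) ++ "\n")) := by
  unfold cetak_gambar
  have hf : (fun (result : String) (baris : Int) =>
      ((PySem.List.pyRange 0 n 1).foldl (fun res kolom =>
          res ++ (if baris = 0 ∨ baris = n - 1 ∨ kolom = PySem.Int.floordiv n 2 then "X " else "= "))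
        result) ++ "\n")
      = (fun (result : String) (baris : Int) =>
          result ++ (String.join ((PySem.List.pyRange 0 n 1).map (fun kolom =>
            if baris = 0 ∨ baris = n - 1 ∨ kolom = PySem.Int.floordiv n 2 then "X " else "= ")) ++ "\n")) := by
    funext result baris
    rw [foldl_append_join, String.append_assoc]
  simp only [hf]
  rw [foldl_append_join]
  simp

-- ===== VERDICT (by name: the statement is the Claim_ definition above) =====
theorem cetak_gambar_spec : Claim_equal_cetak_gambar := by
  intro n _
  unfold Spec_cetak_gambar
  rw [cetak_gambar_eq_join]
  unfold cetak_gambar_alt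
  congr 1
  apply List.map_congr_left
  intro r _
  by_cases h : r = 0 ∨ r = n - 1
  · simp only [if_pos h]
    have : (fun kolom : Int => if r = 0 ∨ r = n - 1 ∨ kolom = PySem.Int.floordiv n 2 then "X " else "= ")
        = fun _ : Int => "X " := by
      funext k; rcases h with h | h <;> simp [h]
    rw [this, List.map_const', PySem.List.length_pyRange_one]
    simp
  · simp only [if_neg h]
    rw [not_or] at h
    congr 2
    apply List.map_congr_left
    intro k _
    simp [h.1, h.2]
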